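-- pv_equiv track=rewrite | github.com/nikfuzz/DataStructures_Algorithms | dynamic_programming_1D/Longest_Balanced_Substring.py | LBSlength
-- ===== SOURCE A (Python) =====
-- def LBSlength(s):
--     if s == '':
--         return 0
--     dp = [0]*len(s)
--     for i in range(1,len(s)):
--         if (s[i] == ')' and s[i-1] == '(') or (s[i] == ']' and s[i-1] == '[') or (s[i] == '}' and s[i-1] == '{'):
--             dp[i] = dp[i-2] + 2
--         elif (s[i] == ')' and (s[i-1] == ')' or s[i-1] == ']' or s[i-1] == '}')):
--             if i-dp[i-1]-1 >= 0 and s[i-dp[i-1]-1] == '(':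
--                 dp[i] = dp[i-1] + 2 + (dp[i-dp[i-1]-2] if i-dp[i-1]-2 >=0 else 0)
--
--
--         elif (s[i] == ']' and (s[i-1] == ')' or s[i-1] == ']' or s[i-1] == '}')):
--             if i-dp[i-1]-1 >= 0 and s[i-dp[i-1]-1] == '[':
--                 dp[i] = dp[i-1] + 2 + (dp[i-dp[i-1]-2] if i-dp[i-1]-2 >=0 else 0)
--
--
--         elif (s[i] == '}' and (s[i-1] == ')' or s[i-1] == ']' or s[i-1] == '}')):
--             if i-dp[i-1]-1 >= 0 and s[i-dp[i-1]-1] == '{':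
--                 dp[i] = dp[i-1] + 2 + (dp[i-dp[i-1]-2] if i-dp[i-1]-2 >=0 else 0)
--
--     return max(dp)
-- ===== SOURCE B (Python) =====
-- def LBSlength(s):
--     pairs = {')': '(', ']': '[', '}': '{'}
--     stack = [-1]
--     best = 0
--     for i, c in enumerate(s):
--         t = stack[-1]
--         if c in pairs and t >= 0 and s[t] == pairs[c]:
--             stack.pop()
--             best = max(best, i - stack[-1])
--         else:
--             stack.append(i)
--     return best
-- ===== Notes on version B (the rewrite author's own statement) =====
-- stated objective: idiomatic
-- what changed: Replaced the per-index dynamic-programming table (with its chained elif branches per bracket type and arithmetic back-references into dp) by the standard single-pass stack-of-indices scan with a -1 sentinel: push unmatched positions, pop on a matching closer and measure against the new stack top.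
import Mathlib
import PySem

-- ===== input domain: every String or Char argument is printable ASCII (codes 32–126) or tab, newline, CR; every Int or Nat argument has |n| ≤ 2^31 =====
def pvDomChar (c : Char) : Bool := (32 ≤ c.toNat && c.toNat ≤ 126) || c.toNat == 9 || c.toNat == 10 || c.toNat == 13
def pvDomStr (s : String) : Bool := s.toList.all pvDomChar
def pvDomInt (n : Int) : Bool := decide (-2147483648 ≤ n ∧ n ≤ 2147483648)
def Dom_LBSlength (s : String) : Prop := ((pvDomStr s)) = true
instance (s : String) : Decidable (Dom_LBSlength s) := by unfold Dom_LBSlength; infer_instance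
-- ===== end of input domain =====

-- B replaces A's per-index DP table (chained elif branches per bracket type) by the standard
-- single-pass stack-of-indices scan with a -1 sentinel; same O(n) cost, idiomatic structure.


-- ===== PORT A =====
-- one iteration of A's dp loop body (i is the Python loop index)
def pvStepA (cs : List Char) (dp : List Int) (i : Int) : List Int :=
  let si := PySem.List.pyGetD cs i ' '
  let sp := PySem.List.pyGetD cs (i - 1) ' '
  let d1 := PySem.List.pyGetD dp (i - 1) 0
  let ext := if 0 ≤ i - d1 - 2 then PySem.List.pyGetD dp (i - d1 - 2) 0 else 0
  if (si = ')' ∧ sp = '(') ∨ (si = ']' ∧ sp = '[') ∨ (si = '}' ∧ sp = '{') then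
    PySem.List.pySetD dp i (PySem.List.pyGetD dp (i - 2) 0 + 2)
  else if si = ')' ∧ (sp = ')' ∨ sp = ']' ∨ sp = '}') then
    if 0 ≤ i - d1 - 1 ∧ PySem.List.pyGetD cs (i - d1 - 1) ' ' = '(' then
      PySem.List.pySetD dp i (d1 + 2 + ext)
    else dp
  else if si = ']' ∧ (sp = ')' ∨ sp = ']' ∨ sp = '}') then
    if 0 ≤ i - d1 - 1 ∧ PySem.List.pyGetD cs (i - d1 - 1) ' ' = '[' then
      PySem.List.pySetD dp i (d1 + 2 + ext)
    else dp
  else if si = '}' ∧ (sp = ')' ∨ sp = ']' ∨ sp = '}') then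
    if 0 ≤ i - d1 - 1 ∧ PySem.List.pyGetD cs (i - d1 - 1) ' ' = '{' then
      PySem.List.pySetD dp i (d1 + 2 + ext)
    else dp
  else dp

def LBSlength (s : String) : Int :=
  if s = "" then 0
  else
    (PySem.List.max? ((PySem.List.pyRange 1 (s.toList.length : Int) 1).foldl (pvStepA s.toList)
      (List.replicate s.toList.length (0 : Int))) (fun x => x)).getD 0

-- ===== PORT B =====
def pvPairs : PySem.Dict Char Char := ⟨[(')', '('), (']', '['), ('}', '{')]⟩

-- one iteration of B's loop; the stack is kept top-first (Python's stack[-1] is the head,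
-- append is cons, pop is tail)
def pvStepB (cs : List Char) (acc : List Int × Int) (ic : Int × Char) : List Int × Int :=
  let t := acc.1.headD (-1)
  match PySem.Dict.get? pvPairs ic.2 with
  | some o =>
    if 0 ≤ t ∧ PySem.List.pyGetD cs t ' ' = o then
      let st' := acc.1.tail
      (st', max acc.2 (ic.1 - st'.headD (-1)))
    else (ic.1 :: acc.1, acc.2)
  | none => (ic.1 :: acc.1, acc.2)

def LBSlength_alt (s : String) : Int :=
  ((PySem.List.enumerate s.toList).foldl (pvStepB s.toList) ([-1], 0)).2

-- ===== PRECONDITION & SPEC =====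
def Spec_LBSlength (s : String) (out : Int) : Prop := out = LBSlength_alt s
instance (s : String) (out : Int) : Decidable (Spec_LBSlength s out) := by unfold Spec_LBSlength; infer_instance

-- ===== CLAIM (what is proved, stated in full; the proofs are below) =====
def Claim_equal_LBSlength : Prop := ∀ (s : String), Dom_LBSlength s → Spec_LBSlength s (LBSlength s)

-- ===== LEMMAS AND PROOFS =====

-- dp[j] read at an Int index, 0 for negative indices (A's dp entries are 0 wherever unwritten)
def pvD (dp : List Int) (j : Int) : Int := if 0 ≤ j then dp.getD j.toNat 0 else 0

-- matching opener of a closing bracket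
def pvOp (c : Char) : Option Char :=
  if c = ')' then some '(' else if c = ']' then some '[' else if c = '}' then some '{' else none

-- the relation linking adjacent stack entries (and the virtual top m)
def pvRel (dp : List Int) (p q : Int) : Prop := q = p - 1 - pvD dp (p - 1)

-- every adjacent pair of the (virtual-top-extended) stack satisfies pvRel
def pvChain (dp : List Int) : List Int → Prop
  | p :: q :: l => pvRel dp p q ∧ pvChain dp (q :: l)
  | _ => True

lemma pvChain_cons_cons (dp : List Int) (p q : Int) (l : List Int) :
    pvChain dp (p :: q :: l) ↔ pvRel dp p q ∧ pvChain dp (q :: l) := Iff.rfl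

-- joint invariant after both loops have processed indices < m
def pvInv (cs : List Char) (m : Nat) (dp st : List Int) (best : Int) : Prop :=
  dp.length = cs.length ∧
  (∀ j : Nat, m ≤ j → dp.getD j 0 = 0) ∧
  (∀ j : Nat, 0 ≤ dp.getD j 0) ∧
  (∀ j : Nat, (pvOp (cs.getD j ' ')).isNone → dp.getD j 0 = 0) ∧
  dp.getD 0 0 = 0 ∧
  pvChain dp ((m : Int) :: st) ∧
  st.getLast? = some (-1) ∧
  best = dp.foldl max 0

lemma pvD_nonneg (dp : List Int) (h : ∀ j : Nat, 0 ≤ dp.getD j 0) (x : Int) : 0 ≤ pvD dp x := by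
  unfold pvD; split
  · exact h _
  · exact le_refl 0

lemma getD_replicate0 (n j : Nat) : (List.replicate n (0:Int)).getD j 0 = 0 := by
  simp only [List.getD, List.getElem?_replicate]
  split <;> simp

lemma foldl_max_replicate0 (n : Nat) : (List.replicate n (0:Int)).foldl max 0 = 0 := by
  induction n with
  | zero => rfl
  | succ k ih => simpa [List.replicate_succ] using ih

lemma foldl_max_max (t : List Int) : ∀ a v : Int, t.foldl max (max a v) = max (t.foldl max a) v := by
  induction t with
  | nil => intro a v; rfl
  | cons x tl ih =>
    intro a v
    have h : max (max a v) x = max (max a x) v := by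
      rw [max_comm a v, max_assoc]
      exact max_comm v (max a x)
    simp only [List.foldl_cons, h, ih]

lemma getD_set_ne (l : List Int) (i j : Nat) (v : Int) (h : i ≠ j) :
    (l.set i v).getD j 0 = l.getD j 0 := by
  simp only [List.getD, List.getElem?_set_ne h]

lemma getD_set_self (l : List Int) (i : Nat) (v : Int) (h : i < l.length) :
    (l.set i v).getD i 0 = v := by
  simp [List.getD, List.getElem?_set_self h]

lemma foldl_max_set (l : List Int) : ∀ (i : Nat) (a v : Int), i < l.length → l.getD i 0 = 0 →
    0 ≤ a → (l.set i v).foldl max a = max (l.foldl max a) v := by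
  induction l with
  | nil => intro i a v h _ _; simp at h
  | cons x tl ih =>
    intro i a v hi h0 ha
    cases i with
    | zero =>
      have hx : x = 0 := by simpa [List.getD] using h0
      subst hx
      simp only [List.set_cons_zero, List.foldl_cons]
      rw [max_eq_left ha]
      exact foldl_max_max tl a v
    | succ k =>
      simp only [List.set_cons_succ, List.foldl_cons]
      exact ih k (max a x) v (by simpa using hi) (by simpa [List.getD] using h0)
        (le_trans ha (le_max_left a x))

lemma pvD_set_lt (dp : List Int) (m : Nat) (v : Int) (x : Int) (hx : x < (m : Int)) :
    pvD (dp.set m v) x = pvD dp x := by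
  unfold pvD; split
  · next h => rw [getD_set_ne _ _ _ _ (by omega)]
  · rfl

lemma chain_congr (dp dp' : List Int) :
    ∀ l : List Int, (∀ p ∈ l, pvD dp' (p - 1) = pvD dp (p - 1)) →
    pvChain dp l → pvChain dp' l := by
  intro l
  induction l with
  | nil => intro _ _; trivial
  | cons x tl ih =>
    intro hmem hch
    cases tl with
    | nil => trivial
    | cons y tl2 =>
      rw [pvChain_cons_cons] at hch ⊢
      refine ⟨?_, ih (fun p hp => hmem p (List.mem_cons_of_mem x hp)) hch.2⟩
      have hx := hmem x List.mem_cons_self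
      unfold pvRel
      rw [hx]; exact hch.1

lemma chain_head_lt (dp : List Int) (h3 : ∀ j : Nat, 0 ≤ dp.getD j 0) :
    ∀ (l : List Int) (x : Int), pvChain dp (x :: l) → ∀ y ∈ l, y < x := by
  intro l
  induction l with
  | nil => intro x _ y hy; simp at hy
  | cons z tl ih =>
    intro x hch y hy
    rw [pvChain_cons_cons] at hch
    have hzx : z < x := by
      have hrel := hch.1
      unfold pvRel at hrel
      have := pvD_nonneg dp h3 (x - 1)
      omega
    rcases List.mem_cons.mp hy with h | h
    · omega
    · exact lt_trans (ih z hch.2 y h) hzx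

-- reading dp at any Int index in [-1, m) yields pvD (the -1 wraparound hits an unwritten 0 entry)
lemma pyGetD_dp_eq_pvD (cs : List Char) (dp : List Int) (m : Nat) (hm : 1 ≤ m) (hmn : m < cs.length)
    (hlen : dp.length = cs.length) (h2 : ∀ j : Nat, m ≤ j → dp.getD j 0 = 0) :
    ∀ x : Int, -1 ≤ x → x < (m : Int) → PySem.List.pyGetD dp x 0 = pvD dp x := by
  intro x h1 h2'
  have hdpne : dp ≠ [] := by
    intro h; rw [h] at hlen; simp at hlen; omega
  rcases lt_or_ge x 0 with hneg | hpos
  · have hx : x = -1 := by omega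
    subst hx
    rw [PySem.List.pyGetD_neg_one dp 0 hdpne, List.getLast_eq_getElem hdpne]
    have hz : dp.getD (dp.length - 1) 0 = 0 := h2 _ (by omega)
    rw [List.getD_eq_getElem _ _ (by omega)] at hz
    rw [hz]; rfl
  · have hxlen : x < (dp.length : Int) := by omega
    rw [PySem.List.pyGetD_eq_getElem dp 0 hpos hxlen]
    unfold pvD
    rw [if_pos hpos, List.getD_eq_getElem _ _ (by omega)]

-- characterization of A's step under the invariant facts
lemma stepA_eq (cs : List Char) (dp : List Int) (m : Nat) (hm : 1 ≤ m) (hmn : m < cs.length)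
    (hlen : dp.length = cs.length)
    (h2 : ∀ j : Nat, m ≤ j → dp.getD j 0 = 0)
    (h3 : ∀ j : Nat, 0 ≤ dp.getD j 0)
    (h4 : ∀ j : Nat, (pvOp (cs.getD j ' ')).isNone → dp.getD j 0 = 0) :
    pvStepA cs dp (m : Int) =
      (match pvOp (cs.getD m ' ') with
       | some o =>
         if 0 ≤ (m : Int) - 1 - dp.getD (m - 1) 0 ∧
             cs.getD ((m : Int) - 1 - dp.getD (m - 1) 0).toNat ' ' = o
         then dp.set m (dp.getD (m - 1) 0 + 2 + pvD dp ((m : Int) - 1 - dp.getD (m - 1) 0 - 1))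
         else dp
       | none => dp) := by
  have hmI : (m : Int) < (cs.length : Int) := by exact_mod_cast hmn
  have hm1 : ((m : Int) - 1) = ((m - 1 : Nat) : Int) := by omega
  have hread := pyGetD_dp_eq_pvD cs dp m hm hmn hlen h2
  have hsi : PySem.List.pyGetD cs (m : Int) ' ' = cs.getD m ' ' := by
    simp [PySem.List.pyGetD_natCast]
  have hsp : PySem.List.pyGetD cs ((m : Int) - 1) ' ' = cs.getD (m - 1) ' ' := by
    rw [hm1]; simp [PySem.List.pyGetD_natCast]
  have hd1 : PySem.List.pyGetD dp ((m : Int) - 1) 0 = dp.getD (m - 1) 0 := by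
    rw [hm1]; simp [PySem.List.pyGetD_natCast]
  have hd1nn : 0 ≤ dp.getD (m - 1) 0 := h3 _
  set d1 := dp.getD (m - 1) 0 with hd1def
  set tt : Int := (m : Int) - 1 - d1 with httdef
  have httlt : tt < (cs.length : Int) := by omega
  have hchar : 0 ≤ tt → PySem.List.pyGetD cs tt ' ' = cs.getD tt.toNat ' ' := by
    intro h0
    rw [PySem.List.pyGetD_eq_getElem cs ' ' h0 httlt, List.getD_eq_getElem _ _ (by omega)]
  have hext : (if 0 ≤ (m : Int) - d1 - 2 then PySem.List.pyGetD dp ((m : Int) - d1 - 2) 0 else 0)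
      = pvD dp (tt - 1) := by
    have he : (m : Int) - d1 - 2 = tt - 1 := by omega
    rw [he]
    split
    · next h0 => exact hread _ (by omega) (by omega)
    · next h0 => unfold pvD; rw [if_neg (by omega)]
  have hset : ∀ v : Int, PySem.List.pySetD dp (m : Int) v = dp.set m v := by
    intro v; simp [pysem]
  have htt1 : (m : Int) - d1 - 1 = tt := by omega
  have hbr1val : d1 = 0 → PySem.List.pyGetD dp ((m : Int) - 2) 0 + 2 = d1 + 2 + pvD dp (tt - 1) := by
    intro h0
    have he : tt - 1 = (m : Int) - 2 := by omega
    rw [he, hread _ (by omega) (by omega)]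
    omega
  unfold pvStepA
  simp only [hsi, hsp, hd1, hext, htt1, hset]
  by_cases hc1 : cs.getD m ' ' = ')'
  case pos =>
    rw [hc1, show pvOp ')' = some '(' from rfl]
    change _ = if 0 ≤ tt ∧ cs.getD tt.toNat ' ' = '(' then
      dp.set m (d1 + 2 + pvD dp (tt - 1)) else dp
    by_cases hb1 : cs.getD (m - 1) ' ' = '('
    · have hd10 : d1 = 0 := h4 (m - 1) (by rw [hb1]; rfl)
      rw [if_pos (Or.inl ⟨rfl, hb1⟩),
        if_pos (show 0 ≤ tt ∧ cs.getD tt.toNat ' ' = '(' from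
          ⟨by omega, by rw [show tt.toNat = m - 1 by omega]; exact hb1⟩),
        hbr1val hd10]
    · have hTopNeg : ¬((')':Char) = ')' ∧ cs.getD (m - 1) ' ' = '(' ∨
          (')':Char) = ']' ∧ cs.getD (m - 1) ' ' = '[' ∨
          (')':Char) = '}' ∧ cs.getD (m - 1) ' ' = '{') := by
        rintro (⟨_, hb⟩ | ⟨hb, _⟩ | ⟨hb, _⟩)
        · exact hb1 hb
        · exact absurd hb (by decide)
        · exact absurd hb (by decide)
      by_cases hbc : cs.getD (m - 1) ' ' = ')' ∨ cs.getD (m - 1) ' ' = ']' ∨ cs.getD (m - 1) ' ' = '}'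
      · rw [if_neg hTopNeg, if_pos ⟨rfl, hbc⟩]
        by_cases h0 : 0 ≤ tt
        · rw [hchar h0]
        · rw [if_neg (show ¬(0 ≤ tt ∧ PySem.List.pyGetD cs tt ' ' = '(') from fun hcon => h0 hcon.1),
              if_neg (show ¬(0 ≤ tt ∧ cs.getD tt.toNat ' ' = '(') from fun hcon => h0 hcon.1)]
      · rw [not_or, not_or] at hbc
        have hd10 : d1 = 0 := h4 (m - 1) (by
          unfold pvOp
          rw [if_neg hbc.1, if_neg hbc.2.1, if_neg hbc.2.2]; rfl)
        rw [if_neg hTopNeg,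
          if_neg (show ¬((')':Char) = ')' ∧ (cs.getD (m - 1) ' ' = ')' ∨ cs.getD (m - 1) ' ' = ']' ∨
            cs.getD (m - 1) ' ' = '}')) from fun hcon => by
              rcases hcon.2 with h | h | h
              exacts [hbc.1 h, hbc.2.1 h, hbc.2.2 h]),
          if_neg (show ¬((')':Char) = ']' ∧ (cs.getD (m - 1) ' ' = ')' ∨ cs.getD (m - 1) ' ' = ']' ∨
            cs.getD (m - 1) ' ' = '}')) from fun hcon => absurd hcon.1 (by decide)),
          if_neg (show ¬((')':Char) = '}' ∧ (cs.getD (m - 1) ' ' = ')' ∨ cs.getD (m - 1) ' ' = ']' ∨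
            cs.getD (m - 1) ' ' = '}')) from fun hcon => absurd hcon.1 (by decide)),
          if_neg (show ¬(0 ≤ tt ∧ cs.getD tt.toNat ' ' = '(') from fun hcon =>
            hb1 (by have hq := hcon.2; rwa [show tt.toNat = m - 1 by omega] at hq))]
  case neg =>
  by_cases hc2 : cs.getD m ' ' = ']'
  case pos =>
    rw [hc2, show pvOp ']' = some '[' from rfl]
    change _ = if 0 ≤ tt ∧ cs.getD tt.toNat ' ' = '[' then
      dp.set m (d1 + 2 + pvD dp (tt - 1)) else dp
    by_cases hb1 : cs.getD (m - 1) ' ' = '['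
    · have hd10 : d1 = 0 := h4 (m - 1) (by rw [hb1]; rfl)
      rw [if_pos (Or.inr (Or.inl ⟨rfl, hb1⟩)),
        if_pos (show 0 ≤ tt ∧ cs.getD tt.toNat ' ' = '[' from
          ⟨by omega, by rw [show tt.toNat = m - 1 by omega]; exact hb1⟩),
        hbr1val hd10]
    · have hTopNeg : ¬((']':Char) = ')' ∧ cs.getD (m - 1) ' ' = '(' ∨
          (']':Char) = ']' ∧ cs.getD (m - 1) ' ' = '[' ∨
          (']':Char) = '}' ∧ cs.getD (m - 1) ' ' = '{') := by
        rintro (⟨hb, _⟩ | ⟨_, hb⟩ | ⟨hb, _⟩)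
        · exact absurd hb (by decide)
        · exact hb1 hb
        · exact absurd hb (by decide)
      have h2Neg : ¬((']':Char) = ')' ∧ (cs.getD (m - 1) ' ' = ')' ∨ cs.getD (m - 1) ' ' = ']' ∨
          cs.getD (m - 1) ' ' = '}')) := fun hcon => absurd hcon.1 (by decide)
      by_cases hbc : cs.getD (m - 1) ' ' = ')' ∨ cs.getD (m - 1) ' ' = ']' ∨ cs.getD (m - 1) ' ' = '}'
      · rw [if_neg hTopNeg, if_neg h2Neg, if_pos ⟨rfl, hbc⟩]
        by_cases h0 : 0 ≤ tt
        · rw [hchar h0]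
        · rw [if_neg (show ¬(0 ≤ tt ∧ PySem.List.pyGetD cs tt ' ' = '[') from fun hcon => h0 hcon.1),
              if_neg (show ¬(0 ≤ tt ∧ cs.getD tt.toNat ' ' = '[') from fun hcon => h0 hcon.1)]
      · rw [not_or, not_or] at hbc
        have hd10 : d1 = 0 := h4 (m - 1) (by
          unfold pvOp
          rw [if_neg hbc.1, if_neg hbc.2.1, if_neg hbc.2.2]; rfl)
        rw [if_neg hTopNeg, if_neg h2Neg,
          if_neg (show ¬((']':Char) = ']' ∧ (cs.getD (m - 1) ' ' = ')' ∨ cs.getD (m - 1) ' ' = ']' ∨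
            cs.getD (m - 1) ' ' = '}')) from fun hcon => by
              rcases hcon.2 with h | h | h
              exacts [hbc.1 h, hbc.2.1 h, hbc.2.2 h]),
          if_neg (show ¬((']':Char) = '}' ∧ (cs.getD (m - 1) ' ' = ')' ∨ cs.getD (m - 1) ' ' = ']' ∨
            cs.getD (m - 1) ' ' = '}')) from fun hcon => absurd hcon.1 (by decide)),
          if_neg (show ¬(0 ≤ tt ∧ cs.getD tt.toNat ' ' = '[') from fun hcon =>
            hb1 (by have hq := hcon.2; rwa [show tt.toNat = m - 1 by omega] at hq))]
  case neg =>
  by_cases hc3 : cs.getD m ' ' = '}'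
  case pos =>
    rw [hc3, show pvOp '}' = some '{' from rfl]
    change _ = if 0 ≤ tt ∧ cs.getD tt.toNat ' ' = '{' then
      dp.set m (d1 + 2 + pvD dp (tt - 1)) else dp
    by_cases hb1 : cs.getD (m - 1) ' ' = '{'
    · have hd10 : d1 = 0 := h4 (m - 1) (by rw [hb1]; rfl)
      rw [if_pos (Or.inr (Or.inr ⟨rfl, hb1⟩)),
        if_pos (show 0 ≤ tt ∧ cs.getD tt.toNat ' ' = '{' from
          ⟨by omega, by rw [show tt.toNat = m - 1 by omega]; exact hb1⟩),
        hbr1val hd10]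
    · have hTopNeg : ¬(('}':Char) = ')' ∧ cs.getD (m - 1) ' ' = '(' ∨
          ('}':Char) = ']' ∧ cs.getD (m - 1) ' ' = '[' ∨
          ('}':Char) = '}' ∧ cs.getD (m - 1) ' ' = '{') := by
        rintro (⟨hb, _⟩ | ⟨hb, _⟩ | ⟨_, hb⟩)
        · exact absurd hb (by decide)
        · exact absurd hb (by decide)
        · exact hb1 hb
      have h2Neg : ¬(('}':Char) = ')' ∧ (cs.getD (m - 1) ' ' = ')' ∨ cs.getD (m - 1) ' ' = ']' ∨
          cs.getD (m - 1) ' ' = '}')) := fun hcon => absurd hcon.1 (by decide)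
      have h3Neg : ¬(('}':Char) = ']' ∧ (cs.getD (m - 1) ' ' = ')' ∨ cs.getD (m - 1) ' ' = ']' ∨
          cs.getD (m - 1) ' ' = '}')) := fun hcon => absurd hcon.1 (by decide)
      by_cases hbc : cs.getD (m - 1) ' ' = ')' ∨ cs.getD (m - 1) ' ' = ']' ∨ cs.getD (m - 1) ' ' = '}'
      · rw [if_neg hTopNeg, if_neg h2Neg, if_neg h3Neg, if_pos ⟨rfl, hbc⟩]
        by_cases h0 : 0 ≤ tt
        · rw [hchar h0]
        · rw [if_neg (show ¬(0 ≤ tt ∧ PySem.List.pyGetD cs tt ' ' = '{') from fun hcon => h0 hcon.1),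
              if_neg (show ¬(0 ≤ tt ∧ cs.getD tt.toNat ' ' = '{') from fun hcon => h0 hcon.1)]
      · rw [not_or, not_or] at hbc
        have hd10 : d1 = 0 := h4 (m - 1) (by
          unfold pvOp
          rw [if_neg hbc.1, if_neg hbc.2.1, if_neg hbc.2.2]; rfl)
        rw [if_neg hTopNeg, if_neg h2Neg, if_neg h3Neg,
          if_neg (show ¬(('}':Char) = '}' ∧ (cs.getD (m - 1) ' ' = ')' ∨ cs.getD (m - 1) ' ' = ']' ∨
            cs.getD (m - 1) ' ' = '}')) from fun hcon => by
              rcases hcon.2 with h | h | h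
              exacts [hbc.1 h, hbc.2.1 h, hbc.2.2 h]),
          if_neg (show ¬(0 ≤ tt ∧ cs.getD tt.toNat ' ' = '{') from fun hcon =>
            hb1 (by have hq := hcon.2; rwa [show tt.toNat = m - 1 by omega] at hq))]
  case neg =>
    rw [show pvOp (cs.getD m ' ') = none from by
      unfold pvOp; rw [if_neg hc1, if_neg hc2, if_neg hc3]]
    change _ = dp
    rw [if_neg (show ¬(cs.getD m ' ' = ')' ∧ cs.getD (m - 1) ' ' = '(' ∨
        cs.getD m ' ' = ']' ∧ cs.getD (m - 1) ' ' = '[' ∨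
        cs.getD m ' ' = '}' ∧ cs.getD (m - 1) ' ' = '{') from by
        rintro (⟨hb, _⟩ | ⟨hb, _⟩ | ⟨hb, _⟩)
        exacts [hc1 hb, hc2 hb, hc3 hb]),
      if_neg (show ¬(cs.getD m ' ' = ')' ∧ (cs.getD (m - 1) ' ' = ')' ∨ cs.getD (m - 1) ' ' = ']' ∨
        cs.getD (m - 1) ' ' = '}')) from fun hcon => hc1 hcon.1),
      if_neg (show ¬(cs.getD m ' ' = ']' ∧ (cs.getD (m - 1) ' ' = ')' ∨ cs.getD (m - 1) ' ' = ']' ∨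
        cs.getD (m - 1) ' ' = '}')) from fun hcon => hc2 hcon.1),
      if_neg (show ¬(cs.getD m ' ' = '}' ∧ (cs.getD (m - 1) ' ' = ')' ∨ cs.getD (m - 1) ' ' = ']' ∨
        cs.getD (m - 1) ' ' = '}')) from fun hcon => hc3 hcon.1)]

lemma get?_pvPairs (c : Char) : PySem.Dict.get? pvPairs c = pvOp c := by
  by_cases h1 : c = ')'
  · subst h1; rfl
  by_cases h2 : c = ']'
  · subst h2; rfl
  by_cases h3 : c = '}'
  · subst h3; rfl
  have e1 : ((')' : Char) == c) = false := beq_eq_false_iff_ne.mpr (Ne.symm h1)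
  have e2 : (((']') : Char) == c) = false := beq_eq_false_iff_ne.mpr (Ne.symm h2)
  have e3 : ((('}') : Char) == c) = false := beq_eq_false_iff_ne.mpr (Ne.symm h3)
  rw [show pvOp c = none from by unfold pvOp; rw [if_neg h1, if_neg h2, if_neg h3]]
  simp [PySem.Dict.get?, pvPairs, List.find?, e1, e2, e3]

-- characterization of B's step
lemma stepB_eq (cs : List Char) (best : Int) (i : Int) (c : Char) (t : Int) (st2 : List Int)
    (htlen : 0 ≤ t → t < (cs.length : Int)) :
    pvStepB cs (t :: st2, best) (i, c) =
      (match pvOp c with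
       | some o => if 0 ≤ t ∧ cs.getD t.toNat ' ' = o
           then (st2, max best (i - st2.headD (-1)))
           else (i :: t :: st2, best)
       | none => (i :: t :: st2, best)) := by
  unfold pvStepB
  rw [get?_pvPairs]
  cases hop : pvOp c with
  | none => rfl
  | some o =>
    dsimp only [List.headD_cons, List.tail_cons]
    by_cases h0 : 0 ≤ t
    · rw [PySem.List.pyGetD_eq_getElem cs ' ' h0 (htlen h0),
        List.getD_eq_getElem _ _ (by have := htlen h0; omega)]
    · rw [if_neg (show ¬(0 ≤ t ∧ PySem.List.pyGetD cs t ' ' = o) from fun hcon => h0 hcon.1),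
          if_neg (show ¬(0 ≤ t ∧ cs.getD t.toNat ' ' = o) from fun hcon => h0 hcon.1)]

-- pushing the current index preserves the invariant (bumped to m+1)
lemma inv_push (cs : List Char) (m : Nat) (dp st : List Int) (best : Int)
    (h : pvInv cs m dp st best) :
    pvInv cs (m + 1) dp ((m : Int) :: st) best := by
  obtain ⟨hlen, h2, h3, h4, h0, hch, hlast, hbest⟩ := h
  refine ⟨hlen, fun j hj => h2 j (by omega), h3, h4, h0, ?_, ?_, hbest⟩
  · refine (pvChain_cons_cons _ _ _ _).mpr ⟨?_, hch⟩
    unfold pvRel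
    have e : ((m + 1 : Nat) : Int) - 1 = (m : Int) := by push_cast; ring
    rw [e]
    have hz : pvD dp (m : Int) = 0 := by
      unfold pvD
      rw [if_pos (Int.natCast_nonneg m)]
      simpa using h2 m le_rfl
    rw [hz]; ring
  · cases st with
    | nil => simp at hlast
    | cons a l => rw [List.getLast?_cons_cons]; exact hlast

lemma inv_step (cs : List Char) (m : Nat) (dp st : List Int) (best : Int)
    (hm : 1 ≤ m) (hmn : m < cs.length) (h : pvInv cs m dp st best) :
    pvInv cs (m + 1) (pvStepA cs dp (m : Int))
      (pvStepB cs (st, best) ((m : Int), cs.getD m ' ')).1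
      (pvStepB cs (st, best) ((m : Int), cs.getD m ' ')).2 := by
  obtain ⟨hlen, h2, h3, h4, h0, hch, hlast, hbest⟩ := h
  have hmI : (m : Int) < (cs.length : Int) := by exact_mod_cast hmn
  cases st with
  | nil => simp at hlast
  | cons t st2 =>
  have hchfull := hch
  rw [pvChain_cons_cons] at hch
  obtain ⟨hrel1, hch2⟩ := hch
  unfold pvRel at hrel1
  have hpv1 : pvD dp ((m : Int) - 1) = dp.getD (m - 1) 0 := by
    unfold pvD
    rw [if_pos (by omega)]
    congr 1
    omega
  have hd1nn := h3 (m - 1)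
  have ht : t = (m : Int) - 1 - dp.getD (m - 1) 0 := by rw [hrel1, hpv1]
  have htlen : 0 ≤ t → t < (cs.length : Int) := by intro _; omega
  rw [stepA_eq cs dp m hm hmn hlen h2 h3 h4, stepB_eq cs best _ _ t st2 htlen, ← ht]
  cases hop : pvOp (cs.getD m ' ') with
  | none =>
    exact inv_push cs m dp (t :: st2) best
      ⟨hlen, h2, h3, h4, h0, hchfull, hlast, hbest⟩
  | some o =>
    by_cases hcnd : 0 ≤ t ∧ cs.getD t.toNat ' ' = o
    case neg =>
      simp only [if_neg hcnd]
      exact inv_push cs m dp (t :: st2) best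
        ⟨hlen, h2, h3, h4, h0, hchfull, hlast, hbest⟩
    case pos =>
      obtain ⟨h0t, hmatch⟩ := hcnd
      cases st2 with
      | nil =>
        exfalso
        simp [List.getLast?] at hlast
        omega
      | cons q st3 =>
      simp only [if_pos (show 0 ≤ t ∧ cs.getD t.toNat ' ' = o from ⟨h0t, hmatch⟩)]
      have hch2full := hch2
      rw [pvChain_cons_cons] at hch2
      obtain ⟨hrel2, hch3⟩ := hch2
      unfold pvRel at hrel2
      have hpvnn := pvD_nonneg dp h3 (t - 1)
      have hkey : (m : Int) - q = dp.getD (m - 1) 0 + 2 + pvD dp (t - 1) := by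
        rw [hrel2]
        omega
      have hvnn : 0 ≤ dp.getD (m - 1) 0 + 2 + pvD dp (t - 1) := by omega
      have hmlt : m < dp.length := by rw [hlen]; exact hmn
      have hlt := chain_head_lt dp h3 (q :: st3) t hch2full
      refine ⟨?_, ?_, ?_, ?_, ?_, ?_, ?_, ?_⟩
      · simp [hlen]
      · intro j hj
        rw [getD_set_ne _ _ _ _ (by omega)]
        exact h2 j (by omega)
      · intro j
        by_cases hjm : j = m
        · subst hjm; rw [getD_set_self _ _ _ hmlt]; exact hvnn
        · rw [getD_set_ne _ _ _ _ (fun he => hjm he.symm)]; exact h3 j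
      · intro j hj
        by_cases hjm : j = m
        · subst hjm; rw [hop] at hj; simp at hj
        · rw [getD_set_ne _ _ _ _ (fun he => hjm he.symm)]; exact h4 j hj
      · rw [getD_set_ne _ _ _ _ (by omega)]; exact h0
      · refine (pvChain_cons_cons _ _ _ _).mpr ⟨?_, ?_⟩
        · unfold pvRel
          have e : ((m + 1 : Nat) : Int) - 1 = (m : Int) := by push_cast; ring
          rw [e]
          have hv : pvD (dp.set m (dp.getD (m - 1) 0 + 2 + pvD dp (t - 1))) (m : Int)
              = dp.getD (m - 1) 0 + 2 + pvD dp (t - 1) := by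
            unfold pvD
            rw [if_pos (Int.natCast_nonneg m)]
            simpa using getD_set_self dp m _ hmlt
          rw [hv]
          omega
        · refine chain_congr dp _ (q :: st3) ?_ hch3
          intro p hp
          have hpt : p < t := hlt p hp
          exact pvD_set_lt dp m _ (p - 1) (by omega)
      · rw [List.getLast?_cons_cons] at hlast
        exact hlast
      · dsimp only [List.headD_cons]
        rw [foldl_max_set dp m 0 _ hmlt (h2 m le_rfl) le_rfl, hbest, hkey]

lemma inv_all (cs : List Char) : ∀ m : Nat, 1 ≤ m → m ≤ cs.length →
    pvInv cs m ((PySem.List.pyRange 1 (m : Int) 1).foldl (pvStepA cs)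
        (List.replicate cs.length (0 : Int)))
      (((PySem.List.enumerate cs).take m).foldl (pvStepB cs) ([-1], 0)).1
      (((PySem.List.enumerate cs).take m).foldl (pvStepB cs) ([-1], 0)).2 := by
  intro m hm
  induction m, hm using Nat.le_induction with
  | base =>
    intro hlen1
    rw [show ((1 : Nat) : Int) = 1 from rfl, PySem.List.pyRange_one_eq_nil le_rfl]
    cases cs with
    | nil => simp at hlen1
    | cons c0 rest =>
    rw [PySem.List.enumerate_cons]
    simp only [List.take_succ_cons, List.take_zero, List.foldl_cons, List.foldl_nil]
    have hstep : pvStepB (c0 :: rest) ([-1], 0) (0, c0) = ([0, -1], 0) := by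
      rw [stepB_eq (c0 :: rest) 0 0 c0 (-1) [] (by intro h; omega)]
      cases pvOp c0 with
      | none => rfl
      | some o => rfl
    rw [hstep]
    have hz : ∀ x : Int, pvD (List.replicate (c0 :: rest).length 0) x = 0 := by
      intro x; unfold pvD; split
      · exact getD_replicate0 _ _
      · rfl
    refine ⟨by simp, fun j _ => getD_replicate0 _ _, fun j => le_of_eq (getD_replicate0 _ _).symm,
      fun j _ => getD_replicate0 _ _, getD_replicate0 _ _, ?_, rfl, (foldl_max_replicate0 _).symm⟩
    refine ⟨?_, ?_, trivial⟩
    · unfold pvRel; rw [hz]; norm_num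
    · unfold pvRel; rw [hz]; norm_num
  | succ n hn ih =>
    intro hsucc
    have hnlt : n < cs.length := by omega
    have hA : PySem.List.pyRange 1 ((n + 1 : Nat) : Int) 1
        = PySem.List.pyRange 1 (n : Int) 1 ++ [(n : Int)] := by
      rw [show ((n + 1 : Nat) : Int) = (n : Int) + 1 by push_cast; ring]
      exact PySem.List.pyRange_one_succ_right (by exact_mod_cast hn)
    have hget : cs.getD n ' ' = cs[n] := List.getD_eq_getElem cs ' ' hnlt
    have hB : (PySem.List.enumerate cs).take (n + 1)
        = (PySem.List.enumerate cs).take n ++ [((n : Int), cs.getD n ' ')] := by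
      rw [List.take_add_one, PySem.List.getElem?_enumerate, List.getElem?_eq_getElem hnlt, hget]
      simp
    rw [hA, hB, List.foldl_append, List.foldl_append]
    simp only [List.foldl_cons, List.foldl_nil]
    exact inv_step cs n _ _ _ hn hnlt (ih (by omega))

-- ===== VERDICT (by name: the statement is the Claim_ definition above) =====
theorem LBSlength_spec : Claim_equal_LBSlength := by
  unfold Claim_equal_LBSlength
  intro s _
  unfold Spec_LBSlength
  by_cases hs : s = ""
  · subst hs; rfl
  · have hne : s.toList ≠ [] := fun h => hs (String.toList_eq_nil_iff.mp h)
    have hlen1 : 1 ≤ s.toList.length := by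
      cases h : s.toList with
      | nil => exact absurd h hne
      | cons a l => simp
    have hInv := inv_all s.toList s.toList.length hlen1 le_rfl
    rw [show (PySem.List.enumerate s.toList).take s.toList.length = PySem.List.enumerate s.toList
      by rw [← PySem.List.length_enumerate s.toList 0]; exact List.take_length] at hInv
    obtain ⟨hlen, h2, h3, h4, h0, hch, hlast, hbest⟩ := hInv
    unfold LBSlength LBSlength_alt
    rw [if_neg hs]
    cases hdp : (PySem.List.pyRange 1 (s.toList.length : Int) 1).foldl (pvStepA s.toList)
        (List.replicate s.toList.length (0 : Int)) with
    | nil =>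
      exfalso
      rw [hdp] at hlen
      have : s.toList.length = 0 := by simpa using hlen.symm
      omega
    | cons x tl =>
      rw [hdp] at h0 hbest
      have hx : x = 0 := by simpa [List.getD] using h0
      rw [PySem.List.max?_id_cons]
      simp only [Option.getD_some]
      rw [hbest, List.foldl_cons, hx]
      simp
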